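-- pv_equiv track=rewrite | github.com/victoralcantara75/algoritmo-evolutino-nome | evolutivo.py | avaliacao
-- ===== SOURCE A (Python) =====
-- def avaliacao(individuos, letra,tamanho_nome):
--
-- 	aptidoes = []
-- 	maximo = False
-- 	idx = -1
--
-- 	for individuo in individuos:
-- 		aptidao = 0
-- 		for pos_individuo, pos_letra in zip(individuo, letra):
-- 			if pos_individuo == pos_letra:
-- 				aptidao = aptidao + 1
-- 		aptidoes.append(aptidao)
--
-- 	if tamanho_nome in aptidoes:
-- 		maximo = True
-- 		idx = aptidoes.index(tamanho_nome)
--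
-- 	return aptidoes, maximo, idx
-- ===== SOURCE B (Python) =====
-- def avaliacao(individuos, letra, tamanho_nome):
--     # one pass: compute each fitness and detect the first perfect/target
--     # individual in the same loop, instead of rescanning aptidoes afterwards
--     aptidoes = []
--     maximo = False
--     idx = -1
--     for i, individuo in enumerate(individuos):
--         aptidao = sum(a == b for a, b in zip(individuo, letra))
--         aptidoes.append(aptidao)
--         if not maximo and aptidao == tamanho_nome:
--             maximo = True
--             idx = i
--     return aptidoes, maximo, idx
-- ===== Notes on version B (the rewrite author's own statement) =====
-- stated objective: alternative
-- what changed: B fuses the target detection into the single fitness loop (enumerate with a first-match guard), eliminating A's separate 'tamanho_nome in aptidoes' membership scan and 'aptidoes.index' rescan.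
import Mathlib
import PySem

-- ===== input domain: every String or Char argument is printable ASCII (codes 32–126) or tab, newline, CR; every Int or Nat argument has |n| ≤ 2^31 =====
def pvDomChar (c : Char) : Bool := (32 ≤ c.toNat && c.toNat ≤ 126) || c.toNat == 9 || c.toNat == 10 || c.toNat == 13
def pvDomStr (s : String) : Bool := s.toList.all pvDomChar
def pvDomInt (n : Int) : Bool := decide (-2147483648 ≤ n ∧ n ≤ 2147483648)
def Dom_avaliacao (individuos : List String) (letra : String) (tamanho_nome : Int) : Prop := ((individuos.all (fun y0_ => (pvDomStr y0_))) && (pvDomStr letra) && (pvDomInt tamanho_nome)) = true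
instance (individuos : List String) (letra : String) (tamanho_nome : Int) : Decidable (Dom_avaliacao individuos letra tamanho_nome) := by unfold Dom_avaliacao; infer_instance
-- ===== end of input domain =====

-- B fuses the target detection into the single fitness loop instead of A's two extra rescans; same return value everywhere.

-- ===== PORT A =====
def avaliacao (individuos : List String) (letra : String) (tamanho_nome : Int) : List Int × Bool × Int :=
  -- aptidoes loop: for each individuo count matching positions of zip(individuo, letra)
  let aptidoes : List Int := individuos.foldl
    (fun acc individuo =>
      acc ++ [(individuo.toList.zip letra.toList).foldl
        (fun aptidao p => if p.1 == p.2 then aptidao + 1 else aptidao) (0 : Int)])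
    []
  -- 'if tamanho_nome in aptidoes: maximo = True; idx = aptidoes.index(tamanho_nome)'
  if tamanho_nome ∈ aptidoes then
    (aptidoes, true, (((PySem.List.index? aptidoes tamanho_nome).getD 0 : Nat) : Int))
  else
    (aptidoes, false, -1)

-- ===== PORT B =====
def avaliacao_alt (individuos : List String) (letra : String) (tamanho_nome : Int) : List Int × Bool × Int :=
  -- one pass over enumerate(individuos) with state (aptidoes, maximo, idx)
  let st := (PySem.List.enumerate individuos 0).foldl
    (fun (st : List Int × Bool × Int) p =>
      let aptidao : Int := ((p.2.toList.zip letra.toList).countP (fun q => q.1 == q.2) : Nat)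
      (st.1 ++ [aptidao],
       if !st.2.1 && aptidao == tamanho_nome then (true, p.1) else st.2))
    ([], false, -1)
  st

-- ===== PRECONDITION & SPEC =====
def Spec_avaliacao (individuos : List String) (letra : String) (tamanho_nome : Int) (out : List Int × Bool × Int) : Prop := out = avaliacao_alt individuos letra tamanho_nome
instance (individuos : List String) (letra : String) (tamanho_nome : Int) (out : List Int × Bool × Int) : Decidable (Spec_avaliacao individuos letra tamanho_nome out) := by unfold Spec_avaliacao; infer_instance

-- ===== CLAIM (what is proved, stated in full; the proofs are below) =====
def Claim_equal_avaliacao : Prop := ∀ (individuos : List String) (letra : String) (tamanho_nome : Int), Dom_avaliacao individuos letra tamanho_nome → Spec_avaliacao individuos letra tamanho_nome (avaliacao individuos letra tamanho_nome)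

-- ===== LEMMAS AND PROOFS =====

-- fitness of one individual, shared characterisation of both inner loops
def pvFit (letra : String) (individuo : String) : Int :=
  ((individuo.toList.zip letra.toList).countP (fun q => q.1 == q.2) : Nat)

-- B's fused loop, characterised: it appends the fitness map and records the first index hitting tamanho_nome
lemma alt_loop (letra : String) (tamanho_nome : Int) (xs : List String) :
    ∀ (s : Int) (acc : List Int) (mi : Bool × Int),
    (PySem.List.enumerate xs s).foldl
      (fun (st : List Int × Bool × Int) p =>
        let aptidao : Int := ((p.2.toList.zip letra.toList).countP (fun q => q.1 == q.2) : Nat)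
        (st.1 ++ [aptidao],
         if !st.2.1 && aptidao == tamanho_nome then (true, p.1) else st.2))
      (acc, mi)
    = (acc ++ xs.map (pvFit letra),
       if mi.1 then mi else
         match PySem.List.index? (xs.map (pvFit letra)) tamanho_nome with
         | some k => (true, s + (k : Int))
         | none => mi) := by
  induction xs with
  | nil => intro s acc mi; simp [PySem.List.enumerate_nil, PySem.List.index?]
  | cons x xs ih =>
    intro s acc mi
    rw [PySem.List.enumerate_cons, List.foldl_cons]
    simp only
    rw [ih (s + 1)]
    by_cases hm : mi.1
    · simp [hm, pvFit]
    · simp only [hm, Bool.not_false, Bool.true_and]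
      by_cases hx : pvFit letra x = tamanho_nome
      · subst hx
        simp only [List.map_cons]
        rw [PySem.List.index?_cons_self]
        simp [pvFit]
      · have hbeq : ((((x.toList.zip letra.toList).countP (fun q => q.1 == q.2) : Nat) : Int) == tamanho_nome) = false := by
          simpa [pvFit, beq_iff_eq] using hx
        simp only [List.map_cons, hbeq, Bool.false_eq_true, if_false]
        rw [PySem.List.index?_cons_of_ne (xs.map (pvFit letra)) hx]
        cases PySem.List.index? (xs.map (pvFit letra)) tamanho_nome with
        | none => simp [pvFit]
        | some k =>
          simp [hm, pvFit]
          omega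

-- ===== VERDICT (by name: the statement is the Claim_ definition above) =====
theorem avaliacao_spec : Claim_equal_avaliacao := by
  intro individuos letra tamanho_nome _
  unfold Spec_avaliacao avaliacao avaliacao_alt
  rw [alt_loop]
  have hmap : individuos.foldl
      (fun acc individuo =>
        acc ++ [(individuo.toList.zip letra.toList).foldl
          (fun aptidao p => if p.1 == p.2 then aptidao + 1 else aptidao) (0 : Int)])
      [] = individuos.map (pvFit letra) := by
    have := PySem.List.foldl_append_singleton_eq_map
      (f := fun individuo : String => (individuo.toList.zip letra.toList).foldl
        (fun aptidao p => if p.1 == p.2 then aptidao + 1 else aptidao) (0 : Int))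
      (l := individuos) (acc := [])
    rw [this, List.nil_append]
    refine List.map_congr_left fun x _ => ?_
    rw [PySem.List.foldl_if_add_one]
    simp [pvFit]
  rw [hmap]
  by_cases hmem : tamanho_nome ∈ individuos.map (pvFit letra)
  · cases hidx : PySem.List.index? (individuos.map (pvFit letra)) tamanho_nome with
    | none =>
      rw [PySem.List.index?_eq_idxOf?] at hidx
      exact absurd hmem (List.idxOf?_eq_none_iff.mp hidx)
    | some k =>
      rw [if_pos hmem, hidx]
      simp
  · have hnone : PySem.List.index? (individuos.map (pvFit letra)) tamanho_nome = none := by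
      rw [PySem.List.index?_eq_idxOf?]
      exact List.idxOf?_eq_none_iff.mpr hmem
    rw [if_neg hmem, hnone]
    simp
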